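-- pv_equiv track=rewrite | github.com/jessemarshall/coalesce_generic_viz_for_omni | omni_to_catalog/table_lineage_parser.py | _find_main_query_start
-- ===== SOURCE A (Python) =====
-- def _find_main_query_start(sql: str) -> int:
--     """Find the position where the main query (after CTEs) starts."""
--     # Track parentheses depth to ignore SELECT inside CTEs
--     depth = 0
--     i = 0
--     sql_len = len(sql)
--
--     # Skip past WITH keyword
--     with_pos = sql.upper().find('WITH')
--     if with_pos >= 0:
--         i = with_pos + 4
--
--     while i < sql_len:
--         if sql[i] == '(':
--             depth += 1
--         elif sql[i] == ')':
--             depth -= 1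
--         elif depth == 0:
--             # We're not inside parentheses, check for main query keywords
--             remaining = sql[i:].upper()
--             if (remaining.startswith('SELECT') or
--                 remaining.startswith('INSERT') or
--                 remaining.startswith('UPDATE') or
--                 remaining.startswith('DELETE')):
--                 # Make sure it's not part of a CTE definition
--                 # Check if there's an AS before this (which would make it a CTE)
--                 before = sql[:i].strip()
--                 if not before.endswith('AS'):
--                     return i
--         i += 1
--
--     return -1
-- ===== SOURCE B (Python) =====
-- def _find_main_query_start(sql: str) -> int:
--     """Find the position where the main query (after CTEs) starts."""
--     upper = sql.upper()
--     with_pos = upper.find('WITH')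
--     start = with_pos + 4 if with_pos >= 0 else 0
--     # Enumerate candidate keyword positions, then check each by recomputing
--     # the parenthesis balance over the scanned region.
--     for i in range(start, len(sql)):
--         if not (upper.startswith('SELECT', i) or upper.startswith('INSERT', i) or
--                 upper.startswith('UPDATE', i) or upper.startswith('DELETE', i)):
--             continue
--         if sql.count('(', start, i) == sql.count(')', start, i) and \
--                 not sql[:i].strip().endswith('AS'):
--             return i
--     return -1
-- ===== Notes on version B (the rewrite author's own statement) =====
-- stated objective: faster
-- what changed: A's incremental scan that dispatches on each character, threads a running parenthesis depth and re-uppercases the whole remaining suffix at every depth-0 position is replaced by a pass that uppercases the text once and checks keyword candidates from the WITH offset, recomputing the parenthesis balance of the scanned slice by counting parentheses per candidate.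
import Mathlib
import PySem

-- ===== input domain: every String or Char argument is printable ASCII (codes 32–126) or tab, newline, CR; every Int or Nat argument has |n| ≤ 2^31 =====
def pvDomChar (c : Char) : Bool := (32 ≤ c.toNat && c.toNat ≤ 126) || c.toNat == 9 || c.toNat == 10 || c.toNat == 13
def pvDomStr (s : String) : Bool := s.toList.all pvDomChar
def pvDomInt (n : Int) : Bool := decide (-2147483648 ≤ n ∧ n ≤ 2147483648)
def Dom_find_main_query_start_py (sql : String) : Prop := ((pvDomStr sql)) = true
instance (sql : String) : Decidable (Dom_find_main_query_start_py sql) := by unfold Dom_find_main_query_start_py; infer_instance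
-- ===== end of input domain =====

-- B replaces A's incremental depth-tracking character scan by a candidate-index pass that
-- recomputes the parenthesis balance per keyword candidate via slice counts (objective: alternative).

-- ===== PORT A =====
-- the while-loop of A: index i, running parenthesis depth
def pvLoopA (cs : List Char) (i : Nat) (depth : Int) : Int :=
  if h : i < cs.length then
    if cs[i] = '(' then pvLoopA cs (i+1) (depth+1)
    else if cs[i] = ')' then pvLoopA cs (i+1) (depth-1)
    else if depth = 0 then
      -- remaining = sql[i:].upper()
      if PySem.Chars.startswith (PySem.Chars.upper (cs.drop i)) "SELECT".toList
         || PySem.Chars.startswith (PySem.Chars.upper (cs.drop i)) "INSERT".toList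
         || PySem.Chars.startswith (PySem.Chars.upper (cs.drop i)) "UPDATE".toList
         || PySem.Chars.startswith (PySem.Chars.upper (cs.drop i)) "DELETE".toList then
        -- before = sql[:i].strip()
        if PySem.Chars.endswith (PySem.Chars.strip (cs.take i)) "AS".toList then
          pvLoopA cs (i+1) depth
        else (i : Int)
      else pvLoopA cs (i+1) depth
    else pvLoopA cs (i+1) depth
  else -1
termination_by cs.length - i

def find_main_query_start_py (sql : String) : Int :=
  let cs := sql.toList
  let with_pos := PySem.Chars.find (PySem.Chars.upper cs) "WITH".toList
  let i0 := if 0 ≤ with_pos then (with_pos + 4).toNat else 0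
  pvLoopA cs i0 0

-- ===== PORT B =====
-- upper.startswith(kw, i) = the uppercased text from offset i starts with kw
def pvKwB (upper : List Char) (i : Nat) : Bool :=
  PySem.Chars.startswith (upper.drop i) "SELECT".toList
  || PySem.Chars.startswith (upper.drop i) "INSERT".toList
  || PySem.Chars.startswith (upper.drop i) "UPDATE".toList
  || PySem.Chars.startswith (upper.drop i) "DELETE".toList

-- the for-loop over range(start, len(sql)); sql.count(c, start, i) is the number of
-- occurrences of the single character c in sql[start:i] = (cs.take i).drop start (exact)
def pvLoopB (cs upper : List Char) (start i : Nat) : Int :=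
  if i < cs.length then
    if pvKwB upper i then
      if ((cs.take i).drop start).count '(' = ((cs.take i).drop start).count ')'
         ∧ ¬ PySem.Chars.endswith (PySem.Chars.strip (cs.take i)) "AS".toList then
        (i : Int)
      else pvLoopB cs upper start (i+1)
    else pvLoopB cs upper start (i+1)
  else -1
termination_by cs.length - i

def find_main_query_start_py_alt (sql : String) : Int :=
  let cs := sql.toList
  let upper := PySem.Chars.upper cs
  let with_pos := PySem.Chars.find upper "WITH".toList
  let start := if 0 ≤ with_pos then (with_pos + 4).toNat else 0
  pvLoopB cs upper start start

-- ===== PRECONDITION & SPEC =====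
def Spec_find_main_query_start_py (sql : String) (out : Int) : Prop := out = find_main_query_start_py_alt sql
instance (sql : String) (out : Int) : Decidable (Spec_find_main_query_start_py sql out) := by unfold Spec_find_main_query_start_py; infer_instance

-- ===== CLAIM (what is proved, stated in full; the proofs are below) =====
def Claim_equal_find_main_query_start_py : Prop := ∀ (sql : String), Dom_find_main_query_start_py sql → Spec_find_main_query_start_py sql (find_main_query_start_py sql)

-- ===== LEMMAS AND PROOFS =====

-- running depth of A at position i = signed parenthesis count of the scanned region sql[start:i]
def pvBal (cs : List Char) (start i : Nat) : Int :=
  (((cs.take i).drop start).count '(' : Int) - (((cs.take i).drop start).count ')' : Int)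

lemma pvRegion_succ (cs : List Char) (start i : Nat) (hs : start ≤ i) (hi : i < cs.length) :
    (cs.take (i+1)).drop start = (cs.take i).drop start ++ [cs[i]] := by
  rw [List.take_add_one, List.getElem?_eq_getElem hi, Option.toList_some,
    List.drop_append_of_le_length (by simp; omega)]

lemma pvBal_succ (cs : List Char) (start i : Nat) (hs : start ≤ i) (hi : i < cs.length) :
    pvBal cs start (i+1) =
      pvBal cs start i + (if cs[i] = '(' then 1 else if cs[i] = ')' then -1 else 0) := by
  unfold pvBal
  rw [pvRegion_succ cs start i hs hi]
  simp only [List.count_append, List.count_cons, List.count_nil, beq_iff_eq]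
  rcases eq_or_ne cs[i] '(' with h | h <;> rcases eq_or_ne cs[i] ')' with h' | h' <;>
    simp only [h, h', if_pos, reduceIte] <;> simp_all <;> omega

lemma pvKwB_false_of_paren (cs : List Char) (i : Nat) (hi : i < cs.length)
    (h : cs[i] = '(' ∨ cs[i] = ')') : pvKwB (PySem.Chars.upper cs) i = false := by
  have hdrop : (PySem.Chars.upper cs).drop i
      = PySem.Chars.upperChar cs[i] :: (cs.drop (i+1)).map PySem.Chars.upperChar := by
    simp only [PySem.Chars.upper, ← List.map_drop, List.drop_eq_getElem_cons hi, List.map_cons]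
  unfold pvKwB
  rw [hdrop]
  have hS : "SELECT".toList = 'S'::'E'::'L'::'E'::'C'::'T'::[] := rfl
  have hI : "INSERT".toList = 'I'::'N'::'S'::'E'::'R'::'T'::[] := rfl
  have hU : "UPDATE".toList = 'U'::'P'::'D'::'A'::'T'::'E'::[] := rfl
  have hD : "DELETE".toList = 'D'::'E'::'L'::'E'::'T'::'E'::[] := rfl
  rw [hS, hI, hU, hD]
  rcases h with h | h <;> rw [h] <;>
    simp only [Bool.or_eq_false_iff] <;>
    refine ⟨⟨⟨?_, ?_⟩, ?_⟩, ?_⟩ <;>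
    rw [← Bool.not_eq_true, PySem.Chars.startswith_iff] <;>
    simp [List.cons_prefix_cons, show PySem.Chars.upperChar '(' = '(' from rfl,
      show PySem.Chars.upperChar ')' = ')' from rfl]

lemma pvKwB_eq (cs : List Char) (i : Nat) :
    pvKwB (PySem.Chars.upper cs) i =
      (PySem.Chars.startswith (PySem.Chars.upper (cs.drop i)) "SELECT".toList
       || PySem.Chars.startswith (PySem.Chars.upper (cs.drop i)) "INSERT".toList
       || PySem.Chars.startswith (PySem.Chars.upper (cs.drop i)) "UPDATE".toList
       || PySem.Chars.startswith (PySem.Chars.upper (cs.drop i)) "DELETE".toList) := by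
  unfold pvKwB
  simp [PySem.Chars.upper, List.map_drop]

lemma pvKey (cs : List Char) (start : Nat) :
    ∀ k i, cs.length ≤ i + k → start ≤ i →
      pvLoopA cs i (pvBal cs start i) = pvLoopB cs (PySem.Chars.upper cs) start i := by
  intro k
  induction k with
  | zero =>
    intro i hk hs
    rw [pvLoopA, pvLoopB]
    rw [dif_neg (by omega), if_neg (by omega)]
  | succ k ih =>
    intro i hk hs
    by_cases hi : i < cs.length
    · rw [pvLoopA, pvLoopB, dif_pos hi, if_pos hi, ← pvKwB_eq cs i]
      by_cases hl : cs[i] = '('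
      · rw [if_pos hl, pvKwB_false_of_paren cs i hi (Or.inl hl)]
        simp only [Bool.false_eq_true, if_false]
        have hbal : pvBal cs start i + 1 = pvBal cs start (i+1) := by
          rw [pvBal_succ cs start i hs hi, if_pos hl]
        rw [hbal]; exact ih (i+1) (by omega) (by omega)
      · rw [if_neg hl]
        by_cases hr : cs[i] = ')'
        · rw [if_pos hr, pvKwB_false_of_paren cs i hi (Or.inr hr)]
          simp only [Bool.false_eq_true, if_false]
          have hbal : pvBal cs start i - 1 = pvBal cs start (i+1) := by
            rw [pvBal_succ cs start i hs hi, if_neg hl, if_pos hr]; ring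
          rw [hbal]; exact ih (i+1) (by omega) (by omega)
        · rw [if_neg hr]
          have hbsame : pvBal cs start i = pvBal cs start (i+1) := by
            rw [pvBal_succ cs start i hs hi, if_neg hl, if_neg hr]; ring
          have ih' : pvLoopA cs (i+1) (pvBal cs start i)
              = pvLoopB cs (PySem.Chars.upper cs) start (i+1) := by
            rw [hbsame]; exact ih (i+1) (by omega) (by omega)
          by_cases hd : pvBal cs start i = 0
          · rw [if_pos hd]
            by_cases hkw : pvKwB (PySem.Chars.upper cs) i = true
            · rw [if_pos hkw, if_pos hkw]
              by_cases has : PySem.Chars.endswith (PySem.Chars.strip (cs.take i)) "AS".toList = true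
              · rw [if_pos has, if_neg (fun hc => hc.2 has), ih']
              · rw [if_neg has, if_pos ⟨by unfold pvBal at hd; omega, has⟩]
            · rw [if_neg hkw, if_neg hkw, ih']
          · rw [if_neg hd]
            by_cases hkw : pvKwB (PySem.Chars.upper cs) i = true
            · rw [if_pos hkw,
                if_neg (fun hc => hd (by unfold pvBal; have := hc.1; omega)), ih']
            · rw [if_neg hkw, ih']
    · rw [pvLoopA, pvLoopB, dif_neg hi, if_neg hi]

lemma pvBal_start (cs : List Char) (start : Nat) : pvBal cs start start = 0 := by
  unfold pvBal
  have h : (cs.take start).drop start = [] := by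
    apply List.drop_eq_nil_of_le; simp
  simp [h]

-- ===== VERDICT (by name: the statement is the Claim_ definition above) =====
theorem find_main_query_start_py_spec : Claim_equal_find_main_query_start_py := by
  intro sql _
  unfold Spec_find_main_query_start_py find_main_query_start_py find_main_query_start_py_alt
  have h := pvKey sql.toList
    (if 0 ≤ PySem.Chars.find (PySem.Chars.upper sql.toList) "WITH".toList
     then (PySem.Chars.find (PySem.Chars.upper sql.toList) "WITH".toList + 4).toNat else 0)
    sql.toList.length _ (by omega) (le_refl _)
  rw [pvBal_start] at h
  simpa using h
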